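-- pv_equiv track=rewrite | github.com/Krprashant94/pyimageocr | pyimageocr/__init__.py | compressInt
-- ===== SOURCE A (Python) =====
-- def compressInt(number):
--     remove  = []
--     for i in range(0, len(number)-1):
--         if abs(number[i] - number[i+1]) < 3:
--             remove.append(number[i+1])
--     for i in range(0, len(remove)):
--         number.remove(remove[i])
--
--     return number
-- ===== SOURCE B (Python) =====
-- def compressInt(number):
--     # Count, in one pass over adjacent pairs, how many occurrences of each
--     # value must be removed; then one pass keeps each value past its quota.
--     cnt = {}
--     for i in range(len(number) - 1):
--         if abs(number[i] - number[i + 1]) < 3: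
--             v = number[i + 1]
--             cnt[v] = cnt.get(v, 0) + 1
--     out = []
--     for x in number:
--         if cnt.get(x, 0) > 0:
--             cnt[x] = cnt.get(x, 0) - 1
--         else:
--             out.append(x)
--     number[:] = out
--     return number
-- ===== Notes on version B (the rewrite author's own statement) =====
-- stated objective: faster
-- what changed: A removes each flagged value with a repeated O(n) list.remove scan (O(n^2) total); B counts the flagged values once in a dict and does a single pass that skips the first cnt[v] occurrences of each value (O(n)).
import Mathlib
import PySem

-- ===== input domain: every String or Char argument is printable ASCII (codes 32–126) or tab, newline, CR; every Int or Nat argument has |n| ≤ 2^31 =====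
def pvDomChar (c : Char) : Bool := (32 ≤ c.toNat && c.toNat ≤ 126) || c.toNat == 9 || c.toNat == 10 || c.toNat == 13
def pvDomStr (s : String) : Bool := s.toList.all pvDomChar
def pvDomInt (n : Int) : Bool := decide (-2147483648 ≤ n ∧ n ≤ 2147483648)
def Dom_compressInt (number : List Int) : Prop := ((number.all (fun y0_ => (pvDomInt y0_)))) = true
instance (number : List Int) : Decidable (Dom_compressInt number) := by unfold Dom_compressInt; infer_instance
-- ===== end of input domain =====

-- B replaces A's repeated list.remove scans by one dict of removal counts and one
-- skipping pass (asymptotically faster). Both Pythons mutate `number` in place and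
-- return it with the same final contents; the equivalence proved is about the
-- returned value.

-- ===== PORT A =====
-- `number.remove(v)`: v is always an element (it was read out of the list), so
-- Python's ValueError branch is unreachable; `.getD cur` only totalises that
-- unreachable branch.
def compressInt (number : List Int) : List Int :=
  let remove : List Int :=
    (PySem.List.pyRange 0 ((number.length : Int) - 1) 1).foldl
      (fun acc i =>
        if (PySem.List.pyGetD number i 0 - PySem.List.pyGetD number (i + 1) 0).natAbs < 3 then
          acc ++ [PySem.List.pyGetD number (i + 1) 0]
        else acc) []
  (PySem.List.pyRange 0 ((remove.length : Int)) 1).foldl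
    (fun cur i => (PySem.List.remove? cur (PySem.List.pyGetD remove i 0)).getD cur) number

-- ===== PORT B =====
def compressInt_alt (number : List Int) : List Int :=
  let cnt : PySem.Dict Int Int :=
    (PySem.List.pyRange 0 ((number.length : Int) - 1) 1).foldl
      (fun d i =>
        if (PySem.List.pyGetD number i 0 - PySem.List.pyGetD number (i + 1) 0).natAbs < 3 then
          d.insert (PySem.List.pyGetD number (i + 1) 0)
            (d.getD (PySem.List.pyGetD number (i + 1) 0) 0 + 1)
        else d) PySem.Dict.empty
  (number.foldl
    (fun (s : PySem.Dict Int Int × List Int) x =>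
      if 0 < s.1.getD x 0 then (s.1.insert x (s.1.getD x 0 - 1), s.2)
      else (s.1, s.2 ++ [x])) (cnt, [])).2

-- ===== PRECONDITION & SPEC =====
def Spec_compressInt (number : List Int) (out : List Int) : Prop := out = compressInt_alt number
instance (number : List Int) (out : List Int) : Decidable (Spec_compressInt number out) := by unfold Spec_compressInt; infer_instance

-- ===== CLAIM (what is proved, stated in full; the proofs are below) =====
def Claim_equal_compressInt : Prop := ∀ (number : List Int), Dom_compressInt number → Spec_compressInt number (compressInt number)

-- ===== LEMMAS AND PROOFS =====

-- Abstract "skip the first f v occurrences of each value v" pass.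
def skipF (f : Int → Nat) : List Int → List Int
  | [] => []
  | x :: t =>
      if 0 < f x then skipF (fun v => if v = x then f x - 1 else f v) t
      else x :: skipF f t

-- A's remove list after the first k loop iterations.
def rsUpto (xs : List Int) (k : Nat) : List Int :=
  (PySem.List.pyRange 0 (k : Int) 1).foldl
    (fun acc i =>
      if (PySem.List.pyGetD xs i 0 - PySem.List.pyGetD xs (i + 1) 0).natAbs < 3 then
        acc ++ [PySem.List.pyGetD xs (i + 1) 0]
      else acc) []

-- B's counter dict after the first k loop iterations.
def dUpto (xs : List Int) (k : Nat) : PySem.Dict Int Int :=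
  (PySem.List.pyRange 0 (k : Int) 1).foldl
    (fun d i =>
      if (PySem.List.pyGetD xs i 0 - PySem.List.pyGetD xs (i + 1) 0).natAbs < 3 then
        d.insert (PySem.List.pyGetD xs (i + 1) 0)
          (d.getD (PySem.List.pyGetD xs (i + 1) 0) 0 + 1)
      else d) PySem.Dict.empty

theorem dUpto_getD (xs : List Int) (k : Nat) (v : Int) :
    (dUpto xs k).getD v 0 = ((rsUpto xs k).count v : Int) := by
  induction k with
  | zero =>
    simp [dUpto, rsUpto, PySem.List.pyRange_one_eq_nil (by omega : (0:Int) ≤ 0)]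
  | succ k ih =>
    have hcast : ((k + 1 : Nat) : Int) = (k : Int) + 1 := by push_cast; ring
    have hsplit : PySem.List.pyRange 0 ((k + 1 : Nat) : Int) 1
        = PySem.List.pyRange 0 (k : Int) 1 ++ [(k : Int)] := by
      rw [hcast, PySem.List.pyRange_one_succ_right (by omega)]
    simp only [dUpto, rsUpto, hsplit, List.foldl_append] at *
    by_cases hc : (PySem.List.pyGetD xs (k : Int) 0 - PySem.List.pyGetD xs ((k : Int) + 1) 0).natAbs < 3
    · simp only [List.foldl_cons, List.foldl_nil, if_pos hc]
      by_cases hv : v = PySem.List.pyGetD xs ((k : Int) + 1) 0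
      · subst hv
        rw [PySem.Dict.getD_insert_self, ih]
        simp [List.count_append]
      · rw [PySem.Dict.getD_insert_of_ne (hne := hv), ih, List.count_append]
        have hz : List.count v [PySem.List.pyGetD xs ((k : Int) + 1) 0] = 0 :=
          List.count_eq_zero.mpr (by simp [hv])
        rw [hz]
        omega
    · simpa only [List.foldl_cons, List.foldl_nil, if_neg hc, List.count_append] using ih

theorem rsUpto_sublist (xs : List Int) (k : Nat) (hk : k + 1 ≤ xs.length) :
    (rsUpto xs k).Sublist (xs.tail.take k) := by
  induction k with
  | zero =>
    simp [rsUpto, PySem.List.pyRange_one_eq_nil (by omega : (0:Int) ≤ 0)]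
  | succ k ih =>
    have hk' : k + 1 ≤ xs.length := by omega
    have hcast : ((k + 1 : Nat) : Int) = (k : Int) + 1 := by push_cast; ring
    have hsplit : PySem.List.pyRange 0 ((k + 1 : Nat) : Int) 1
        = PySem.List.pyRange 0 (k : Int) 1 ++ [(k : Int)] := by
      rw [hcast, PySem.List.pyRange_one_succ_right (by omega)]
    have htake : xs.tail.take (k + 1) = xs.tail.take k ++ [xs.tail.getD k 0] := by
      have hklen : k < xs.tail.length := by
        simp [List.length_tail]; omega
      rw [List.take_add_one]
      simp [List.getD_eq_getElem?_getD, List.getElem?_eq_getElem hklen]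
    simp only [rsUpto, hsplit, List.foldl_append, List.foldl_cons, List.foldl_nil]
    by_cases hc : (PySem.List.pyGetD xs (k : Int) 0 - PySem.List.pyGetD xs ((k : Int) + 1) 0).natAbs < 3
    · rw [if_pos hc, htake]
      refine List.Sublist.append (ih hk') ?_
      have hgx : PySem.List.pyGetD xs ((k : Int) + 1) 0 = xs.tail.getD k 0 := by
        rw [← hcast, PySem.List.pyGetD_natCast]
        rcases xs with _ | ⟨y, ys⟩
        · simp at hk
        · simp [List.getD]
      rw [hgx]
    · rw [if_neg hc]
      refine (ih hk').trans ?_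
      have : xs.tail.take k = (xs.tail.take (k+1)).take k := by
        rw [List.take_take]; simp
      rw [this]
      exact List.take_sublist _ _

theorem pass_eq_skipF (xs : List Int) (d : PySem.Dict Int Int) (f : Int → Nat) (acc : List Int)
    (h : ∀ v, d.getD v 0 = (f v : Int)) :
    (xs.foldl
      (fun (s : PySem.Dict Int Int × List Int) x =>
        if 0 < s.1.getD x 0 then (s.1.insert x (s.1.getD x 0 - 1), s.2)
        else (s.1, s.2 ++ [x])) (d, acc)).2 = acc ++ skipF f xs := by
  induction xs generalizing d f acc with
  | nil => simp [skipF]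
  | cons x t ih =>
    simp only [List.foldl_cons]
    by_cases hx : 0 < f x
    · have hd : 0 < d.getD x 0 := by rw [h x]; exact_mod_cast hx
      rw [if_pos hd]
      rw [ih (d.insert x (d.getD x 0 - 1)) (fun v => if v = x then f x - 1 else f v) acc ?_]
      · rw [skipF, if_pos hx]
      · intro v
        by_cases hv : v = x
        · subst hv
          have hb : ((fun u : Int => if u = v then f v - 1 else f u) v) = f v - 1 := by simp
          rw [hb, PySem.Dict.getD_insert_self, h v]
          have hx' : 0 < f v := hx
          omega
        · have hb : ((fun u : Int => if u = x then f x - 1 else f u) v) = f v := by simp [hv]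
          rw [hb, PySem.Dict.getD_insert_of_ne (hne := hv), h v]
    · have hd : ¬ 0 < d.getD x 0 := by rw [h x]; exact_mod_cast hx
      rw [if_neg hd, ih d f (acc ++ [x]) h, skipF, if_neg hx]
      simp

theorem skipF_zero (xs : List Int) (f : Int → Nat) (h : ∀ v, f v = 0) : skipF f xs = xs := by
  induction xs with
  | nil => simp [skipF]
  | cons x t ih => simp [skipF, h x, ih]

theorem skipF_erase (xs : List Int) (f : Int → Nat) (r : Int) (hr : r ∈ xs) :
    skipF (fun v => if v = r then f v + 1 else f v) xs = skipF f (xs.erase r) := by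
  induction xs generalizing f with
  | nil => simp at hr
  | cons x t ih =>
    by_cases hx : x = r
    · subst hx
      rw [List.erase_cons_head, skipF]
      rw [if_pos (by simp)]
      congr 1
      funext v
      by_cases hv : v = x <;> simp [hv]
    · have hrx2 : ¬ r = x := fun hh => hx hh.symm
      have hxr : (x :: t).erase r = x :: t.erase r := by simp [hx]
      have hrt : r ∈ t := by
        rcases List.mem_cons.mp hr with h1 | h1
        · exact absurd h1.symm hx
        · exact h1
      rw [hxr, skipF, skipF]
      have hgx : (if x = r then f x + 1 else f x) = f x := by simp [hx]
      rw [hgx]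
      by_cases hf : 0 < f x
      · rw [if_pos hf, if_pos hf]
        have hfun : (fun v => if v = x then f x - 1 else if v = r then f v + 1 else f v)
            = (fun v => if v = r then (if v = x then f x - 1 else f v) + 1
                        else (if v = x then f x - 1 else f v)) := by
          funext v
          by_cases hv : v = x
          · subst hv; rw [if_pos rfl, if_neg hx, if_pos rfl]
          · by_cases hv' : v = r
            · subst hv'; rw [if_neg hrx2, if_pos rfl, if_pos rfl, if_neg hrx2]
            · rw [if_neg hv, if_neg hv', if_neg hv', if_neg hv]
        rw [hfun, ih _ hrt]
      · rw [if_neg hf, if_neg hf, ih _ hrt]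

theorem removal_eq_skipF (rs : List Int) (xs : List Int)
    (h : ∀ v, rs.count v ≤ xs.count v) :
    rs.foldl (fun cur v => (PySem.List.remove? cur v).getD cur) xs
      = skipF (fun v => rs.count v) xs := by
  induction rs generalizing xs with
  | nil =>
    simp only [List.foldl_nil]
    rw [skipF_zero xs _ (by simp)]
  | cons r rs ih =>
    have hrx : r ∈ xs := by
      have := h r
      rw [List.count_cons_self] at this
      exact List.count_pos_iff.mp (by omega)
    rw [List.foldl_cons, PySem.List.remove?_eq_some_erase xs r hrx, Option.getD_some]
    rw [ih (xs.erase r) ?_]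
    · have hfun : (fun v => (r :: rs).count v)
          = (fun v => if v = r then rs.count v + 1 else rs.count v) := by
        funext v
        by_cases hv : v = r
        · subst hv; rw [List.count_cons_self, if_pos rfl]
        · rw [List.count_cons_of_ne (show r ≠ v from fun hh => hv hh.symm), if_neg hv]
      rw [hfun, ← skipF_erase xs (fun v => rs.count v) r hrx]
    · intro v
      by_cases hv : v = r
      · subst hv
        rw [List.count_erase_self]
        have hc := h v
        rw [List.count_cons_self] at hc
        omega
      · have hcx := (List.perm_cons_erase hrx).count_eq v
        rw [List.count_cons] at hcx
        simp only [beq_iff_eq] at hcx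
        rw [if_neg (show ¬ r = v from fun hh => hv hh.symm)] at hcx
        have hc := h v
        rw [List.count_cons] at hc
        simp only [beq_iff_eq] at hc
        rw [if_neg (show ¬ r = v from fun hh => hv hh.symm)] at hc
        omega

-- ===== VERDICT (by name: the statement is the Claim_ definition above) =====
theorem compressInt_spec : Claim_equal_compressInt := by
  intro number _
  unfold Spec_compressInt compressInt compressInt_alt
  have hr : PySem.List.pyRange 0 ((number.length : Int) - 1) 1
      = PySem.List.pyRange 0 ((number.length - 1 : Nat) : Int) 1 := by
    by_cases hn : number.length = 0
    · rw [hn]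
      rw [PySem.List.pyRange_one_eq_nil (by omega), PySem.List.pyRange_one_eq_nil (by omega)]
    · congr 1; omega
  simp only [hr]
  set K := number.length - 1 with hK
  change (PySem.List.pyRange 0 ((rsUpto number K).length : Int) 1).foldl
      (fun cur i => (PySem.List.remove? cur (PySem.List.pyGetD (rsUpto number K) i 0)).getD cur) number
    = (number.foldl
        (fun (s : PySem.Dict Int Int × List Int) x =>
          if 0 < s.1.getD x 0 then (s.1.insert x (s.1.getD x 0 - 1), s.2)
          else (s.1, s.2 ++ [x])) (dUpto number K, [])).2
  rw [PySem.List.foldl_pyRange_zero_pyGetD' (rsUpto number K) 0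
    (fun cur v => (PySem.List.remove? cur v).getD cur) number]
  have hcount : ∀ v, (rsUpto number K).count v ≤ number.count v := by
    intro v
    by_cases hn : number.length = 0
    · have : K = 0 := by omega
      rw [this]
      simp [rsUpto, PySem.List.pyRange_one_eq_nil (by omega : (0:Int) ≤ 0)]
    · have hsub : (rsUpto number K).Sublist number :=
        ((rsUpto_sublist number K (by omega)).trans (List.take_sublist _ _)).trans
          (List.tail_sublist number)
      exact List.Sublist.count_le v hsub
  rw [removal_eq_skipF _ _ hcount,
    pass_eq_skipF number (dUpto number K) (fun v => (rsUpto number K).count v) []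
      (fun v => dUpto_getD number K v)]
  simp
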